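-- pv_equiv track=rewrite | github.com/rmejia4209/Advent-of-Code-2024 | Day_13/sol.py | create_data_chunks
-- ===== SOURCE A (Python) =====
-- def create_data_chunks(data: list[str]) -> list[list[str]]:
--     """Returns a list of list of problems"""
--     data_chunks = []
--     chunk = []
--     for item in data:
--         if item:
--             chunk.append(item)
--         else:
--             data_chunks.append(chunk[:])
--             chunk.clear()
--     data_chunks.append(chunk)
--     return data_chunks
-- ===== SOURCE B (Python) =====
-- def create_data_chunks(data: list[str]) -> list[list[str]]:
--     """Returns a list of list of problems (boundary indices + slicing)."""
--     boundaries = [i for i, x in enumerate(data) if not x]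
--     chunks = []
--     start = 0
--     for idx in boundaries:
--         chunks.append(data[start:idx])
--         start = idx + 1
--     chunks.append(data[start:])
--     return chunks
-- ===== Notes on version B (the rewrite author's own statement) =====
-- stated objective: alternative
-- what changed: B first collects the indices of blank separators in one pass, then builds every chunk by slicing data between consecutive boundaries, instead of A's single scan that grows and copies a mutable current-chunk buffer.
import Mathlib
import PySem

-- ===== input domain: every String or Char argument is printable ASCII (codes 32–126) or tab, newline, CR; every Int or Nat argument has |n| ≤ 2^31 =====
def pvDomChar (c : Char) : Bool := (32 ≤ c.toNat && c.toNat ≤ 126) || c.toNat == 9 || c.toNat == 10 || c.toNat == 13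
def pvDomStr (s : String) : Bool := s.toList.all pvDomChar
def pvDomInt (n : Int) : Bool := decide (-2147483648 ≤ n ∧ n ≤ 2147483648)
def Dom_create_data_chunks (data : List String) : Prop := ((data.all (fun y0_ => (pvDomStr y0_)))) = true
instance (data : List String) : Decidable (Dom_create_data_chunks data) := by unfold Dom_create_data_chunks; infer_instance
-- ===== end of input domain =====

-- B replaces A's single accumulating scan by a boundary-index pass followed by a slicing pass (same cost, different decomposition).

-- ===== PORT A =====
-- the loop body of A: grow the current chunk, or emit a copy of it and clear it
def pvStepA (s : List (List String) × List String) (item : String) : List (List String) × List String :=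
  if item ≠ "" then (s.1, s.2 ++ [item]) else (s.1 ++ [s.2], [])

def create_data_chunks (data : List String) : List (List String) :=
  let s := data.foldl pvStepA ([], [])
  s.1 ++ [s.2]

-- ===== PORT B =====
def create_data_chunks_alt (data : List String) : List (List String) :=
  let boundaries := (PySem.List.enumerate data).filterMap (fun p => if p.2 = "" then some p.1 else none)
  let s := boundaries.foldl
    (fun (s : List (List String) × Int) idx =>
      (s.1 ++ [PySem.List.slice data (some s.2) (some idx)], idx + 1)) ([], 0)
  s.1 ++ [PySem.List.slice data (some s.2) none]

-- ===== PRECONDITION & SPEC =====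
def Spec_create_data_chunks (data : List String) (out : List (List String)) : Prop := out = create_data_chunks_alt data
instance (data : List String) (out : List (List String)) : Decidable (Spec_create_data_chunks data out) := by unfold Spec_create_data_chunks; infer_instance

-- ===== CLAIM (what is proved, stated in full; the proofs are below) =====
def Claim_equal_create_data_chunks : Prop := ∀ (data : List String), Dom_create_data_chunks data → Spec_create_data_chunks data (create_data_chunks data)

-- ===== LEMMAS AND PROOFS =====

-- common reference: split as a foldr (cons to head chunk, or open a new chunk)
def pvStepB (chunks : List (List String)) (item : String) : List (List String) :=
  if item ≠ "" then
    match chunks with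
    | c :: cs => (item :: c) :: cs
    | [] => [[item]]
  else
    [] :: chunks

def pvFoldB (data : List String) : List (List String) :=
  data.foldr (fun x y => pvStepB y x) [[]]

lemma pvFoldB_ne_nil (data : List String) : pvFoldB data ≠ [] := by
  induction data with
  | nil => simp [pvFoldB]
  | cons x xs ih =>
    simp only [pvFoldB, List.foldr] at *
    cases h : xs.foldr (fun x y => pvStepB y x) [[]] with
    | nil => exact absurd h ih
    | cons c cs => by_cases hx : x = "" <;> simp [pvStepB, hx]

def pvConsHead (c : List String) (l : List (List String)) : List (List String) :=
  match l with
  | [] => [c]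
  | h :: t => (c ++ h) :: t

-- ===== A-side: the forward fold equals pvFoldB =====
lemma pv_main (xs : List String) : ∀ (cs : List (List String)) (c : List String),
    (xs.foldl pvStepA (cs, c)).1 ++ [(xs.foldl pvStepA (cs, c)).2]
      = cs ++ pvConsHead c (pvFoldB xs) := by
  induction xs with
  | nil => intro cs c; simp [pvFoldB, pvConsHead]
  | cons x xs ih =>
    intro cs c
    by_cases hx : x = ""
    · have hstep : pvStepA (cs, c) x = (cs ++ [c], []) := by simp [pvStepA, hx]
      rw [List.foldl_cons, hstep, ih]
      simp only [pvFoldB, List.foldr]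
      cases h : xs.foldr (fun x y => pvStepB y x) [[]] with
      | nil => exact absurd h (by simpa [pvFoldB] using pvFoldB_ne_nil xs)
      | cons d ds => simp [pvConsHead, pvStepB, hx]
    · have hstep : pvStepA (cs, c) x = (cs, c ++ [x]) := by simp [pvStepA, hx]
      rw [List.foldl_cons, hstep, ih]
      simp only [pvFoldB, List.foldr]
      cases h : xs.foldr (fun x y => pvStepB y x) [[]] with
      | nil => exact absurd h (by simpa [pvFoldB] using pvFoldB_ne_nil xs)
      | cons d ds => simp [pvConsHead, pvStepB, hx]

lemma pvA_eq_foldB (data : List String) : create_data_chunks data = pvFoldB data := by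
  unfold create_data_chunks
  have := pv_main data [] []
  simp only [List.nil_append] at this
  rw [this]
  cases h : pvFoldB data with
  | nil => exact absurd h (pvFoldB_ne_nil data)
  | cons d ds => simp [pvConsHead]

-- ===== B-side =====
-- relative blank-separator positions
def pvBnds : List String → List Nat
  | [] => []
  | x :: xs => (if x = "" then [0] else []) ++ (pvBnds xs).map (· + 1)

lemma pv_enf (xs : List String) : ∀ (s : Nat),
    (PySem.List.enumerate xs (s : Int)).filterMap (fun p => if p.2 = "" then some p.1 else none)
      = (pvBnds xs).map (fun i => ((s + i : Nat) : Int)) := by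
  induction xs with
  | nil => intro s; simp [PySem.List.enumerate_nil, pvBnds]
  | cons x xs ih =>
    intro s
    rw [PySem.List.enumerate_cons]
    have h1 : ((s : Int) + 1) = ((s + 1 : Nat) : Int) := by push_cast; ring
    by_cases hx : x = ""
    · rw [List.filterMap_cons]
      simp only [hx, if_pos rfl, h1, ih, pvBnds]
      simp only [if_true, List.singleton_append, List.map_cons, List.map_map, Nat.add_zero]
      congr 1
      apply List.map_congr_left; intro i _
      simp only [Function.comp_apply]
      exact congrArg _ (by omega)
    · rw [List.filterMap_cons]
      simp only [hx, if_neg (by simp [hx] : ¬((x : String) = "")), h1, ih, pvBnds]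
      simp only [if_false, List.nil_append, List.map_map]
      apply List.map_congr_left; intro i _
      simp only [Function.comp_apply]
      exact congrArg _ (by omega)
-- the Nat-indexed version of B's slicing fold
def pvGN (D : List String) (s : List (List String) × Nat) (i : Nat) : List (List String) × Nat :=
  (s.1 ++ [(D.drop s.2).take (i - s.2)], i + 1)

lemma pv_castfold (D : List String) (l : List Nat) : ∀ (A : List (List String)) (st : Nat),
    (l.map (fun i : Nat => (i : Int))).foldl
        (fun (s : List (List String) × Int) idx =>
          (s.1 ++ [PySem.List.slice D (some s.2) (some idx)], idx + 1)) (A, (st : Int))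
      = ((l.foldl (pvGN D) (A, st)).1, ((l.foldl (pvGN D) (A, st)).2 : Int)) := by
  induction l with
  | nil => intro A st; simp
  | cons i l ih =>
    intro A st
    simp only [List.map_cons, List.foldl_cons]
    rw [PySem.List.slice_natCast]
    have h1 : ((i : Int) + 1) = ((i + 1 : Nat) : Int) := by push_cast; ring
    rw [h1, ih]
    rfl

lemma pv_accN (D : List String) (l : List Nat) : ∀ (A : List (List String)) (st : Nat),
    l.foldl (pvGN D) (A, st) = (A ++ (l.foldl (pvGN D) ([], st)).1, (l.foldl (pvGN D) ([], st)).2) := by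
  induction l with
  | nil => intro A st; simp
  | cons i l ih =>
    intro A st
    simp only [List.foldl_cons, pvGN, List.nil_append]
    rw [ih, ih ([(D.drop st).take (i - st)]) (i + 1)]
    simp

lemma pv_shiftN (x : String) (xs : List String) (l : List Nat) : ∀ (A : List (List String)) (st : Nat),
    (l.map (· + 1)).foldl (pvGN (x :: xs)) (A, st + 1)
      = ((l.foldl (pvGN xs) (A, st)).1, (l.foldl (pvGN xs) (A, st)).2 + 1) := by
  induction l with
  | nil => intro A st; simp
  | cons i l ih =>
    intro A st
    simp only [List.map_cons, List.foldl_cons, pvGN, List.drop_succ_cons, Nat.succ_sub_succ]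
    exact ih _ _

-- B's result in Nat form
def pvOutN (xs : List String) : List (List String) :=
  ((pvBnds xs).foldl (pvGN xs) ([], 0)).1 ++ [xs.drop ((pvBnds xs).foldl (pvGN xs) ([], 0)).2]

lemma pv_mainN (xs : List String) : pvOutN xs = pvFoldB xs := by
  induction xs with
  | nil => simp [pvOutN, pvBnds, pvFoldB]
  | cons x xs ih =>
    by_cases hx : x = ""
    · have hbx : pvBnds (x :: xs) = 0 :: (pvBnds xs).map (· + 1) := by simp [pvBnds, hx]
      unfold pvOutN
      rw [hbx, List.foldl_cons]
      have h0 : pvGN (x :: xs) ([], 0) 0 = ([[]], 1) := by simp [pvGN]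
      rw [h0, pv_shiftN x xs _ _ 0, pv_accN, List.drop_succ_cons]
      simp only [List.cons_append, List.nil_append]
      rw [show (List.foldl (pvGN xs) ([], 0) (pvBnds xs)).1 ++ [List.drop (List.foldl (pvGN xs) ([], 0) (pvBnds xs)).2 xs] = pvOutN xs from rfl, ih]
      simp [pvFoldB, pvStepB, hx]
    · have hbx : pvBnds (x :: xs) = (pvBnds xs).map (· + 1) := by simp [pvBnds, hx]
      unfold pvOutN
      rw [hbx]
      cases hb : pvBnds xs with
      | nil =>
        have : pvOutN xs = [xs] := by simp [pvOutN, hb]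
        rw [this] at ih
        simp only [List.map_nil, List.foldl_nil, List.nil_append, List.drop_zero]
        have hf : pvFoldB (x :: xs) = pvStepB (pvFoldB xs) x := rfl
        rw [hf, ← ih]
        simp [pvStepB, hx]
      | cons i l =>
        rw [List.map_cons, List.foldl_cons]
        have h0 : pvGN (x :: xs) ([], 0) (i + 1) = ([x :: xs.take i], i + 2) := by
          simp [pvGN]
        rw [h0, show (i + 2) = (i + 1) + 1 from rfl, pv_shiftN x xs l _ (i + 1),
          pv_accN xs l, List.drop_succ_cons]
        have hOut : pvOutN xs = (xs.take i) :: ((List.foldl (pvGN xs) ([], i + 1) l).1 ++ [List.drop (List.foldl (pvGN xs) ([], i + 1) l).2 xs]) := by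
          unfold pvOutN
          rw [hb, List.foldl_cons]
          have : pvGN xs ([], 0) i = ([xs.take i], i + 1) := by simp [pvGN]
          rw [this, pv_accN xs l]
          simp
        rw [hOut] at ih
        simp only [List.cons_append, List.nil_append]
        have hf : pvFoldB (x :: xs) = pvStepB (pvFoldB xs) x := rfl
        rw [hf, ← ih]
        simp [pvStepB, hx]

lemma pvB_eq_foldB (data : List String) : create_data_chunks_alt data = pvFoldB data := by
  have he := pv_enf data 0
  simp only [Nat.cast_zero, Nat.zero_add] at he
  have hz : create_data_chunks_alt data =
      (let s := ((PySem.List.enumerate data).filterMap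
            (fun p => if p.2 = "" then some p.1 else none)).foldl
          (fun (s : List (List String) × Int) idx =>
            (s.1 ++ [PySem.List.slice data (some s.2) (some idx)], idx + 1)) ([], 0)
       s.1 ++ [PySem.List.slice data (some s.2) none]) := rfl
  rw [hz]
  simp only [he]
  rw [show ((0 : Int)) = ((0 : Nat) : Int) from rfl, pv_castfold, PySem.List.slice_from_natCast]
  rw [show ((pvBnds data).foldl (pvGN data) ([], 0)).1 ++ [data.drop ((pvBnds data).foldl (pvGN data) ([], 0)).2] = pvOutN data from rfl]
  exact pv_mainN data

-- ===== VERDICT (by name: the statement is the Claim_ definition above) =====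
theorem create_data_chunks_spec : Claim_equal_create_data_chunks := by
  intro data _
  unfold Spec_create_data_chunks
  rw [pvA_eq_foldB, pvB_eq_foldB]
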